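-- pv_equiv track=rewrite | github.com/Ode-PBLLC/tde | mcp/servers_v2/lse_server_v2.py | count_yes_no
-- ===== SOURCE A (Python) =====
-- from typing import Any, Callable, Dict, Iterable, List, Optional, Sequence, Set, Tuple
--
-- def count_yes_no(responses: Iterable[str]) -> Dict[str, int]:
--     """Count simple yes/no style responses."""
--
--     yes = no = other = 0
--     for response in responses:
--         if not response:
--             continue
--         value = response.strip().lower()
--         if value.startswith("yes"):
--             yes += 1
--         elif value.startswith("no"):
--             no += 1
--         else:
--             other += 1
--     return {"yes": yes, "no": no, "other": other}
-- ===== SOURCE B (Python) =====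
-- def count_yes_no(responses):
--     """Count simple yes/no style responses."""
--     xs = list(responses)
--     total = sum(1 for r in xs if r)
--     yes = sum(1 for r in xs if r.strip().lower().startswith("yes"))
--     no = sum(1 for r in xs if r.strip().lower().startswith("no"))
--     return {"yes": yes, "no": no, "other": total - yes - no}
-- ===== Notes on version B (the rewrite author's own statement) =====
-- stated objective: idiomatic
-- what changed: Replaces the single stateful if/elif loop over three counters by three independent filtered sums (yes, no, total) and derives the 'other' bucket by subtraction, relying on the mutual exclusivity of the 'yes'/'no' prefixes.
import Mathlib
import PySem

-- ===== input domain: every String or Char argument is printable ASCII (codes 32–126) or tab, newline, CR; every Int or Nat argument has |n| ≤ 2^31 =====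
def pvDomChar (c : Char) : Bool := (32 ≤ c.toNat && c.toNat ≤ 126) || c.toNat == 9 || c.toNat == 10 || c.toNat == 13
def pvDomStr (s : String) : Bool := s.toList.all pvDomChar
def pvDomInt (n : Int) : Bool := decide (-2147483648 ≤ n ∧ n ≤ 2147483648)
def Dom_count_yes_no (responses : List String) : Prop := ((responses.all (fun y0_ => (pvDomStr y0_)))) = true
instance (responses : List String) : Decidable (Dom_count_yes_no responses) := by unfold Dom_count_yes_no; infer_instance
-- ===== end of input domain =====

-- B replaces A's single stateful if/elif loop by three independent filtered counts, deriving 'other' by subtraction (idiomatic decomposition, same cost).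


-- ===== PORT A =====
def count_yes_no (responses : List String) : List (String × Int) :=
  let s : Int × Int × Int := responses.foldl (fun acc response =>
    if response == "" then acc
    else
      let value := PySem.Str.lower (PySem.Str.strip response)
      if PySem.Str.startswith value "yes" then (acc.1 + 1, acc.2.1, acc.2.2)
      else if PySem.Str.startswith value "no" then (acc.1, acc.2.1 + 1, acc.2.2)
      else (acc.1, acc.2.1, acc.2.2 + 1)) (0, 0, 0)
  [("yes", s.1), ("no", s.2.1), ("other", s.2.2)]

-- ===== PORT B =====
def pvNorm (s : String) : String := PySem.Str.lower (PySem.Str.strip s)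

def count_yes_no_alt (responses : List String) : List (String × Int) :=
  let total : Int := (responses.countP (fun r => !(r == "")) : Int)
  let yes : Int := (responses.countP (fun r => PySem.Str.startswith (pvNorm r) "yes") : Int)
  let no : Int := (responses.countP (fun r => PySem.Str.startswith (pvNorm r) "no") : Int)
  [("yes", yes), ("no", no), ("other", total - yes - no)]

-- ===== PRECONDITION & SPEC =====
def Spec_count_yes_no (responses : List String) (out : List (String × Int)) : Prop := out = count_yes_no_alt responses
instance (responses : List String) (out : List (String × Int)) : Decidable (Spec_count_yes_no responses out) := by unfold Spec_count_yes_no; infer_instance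

-- ===== CLAIM (what is proved, stated in full; the proofs are below) =====
def Claim_equal_count_yes_no : Prop := ∀ (responses : List String), Dom_count_yes_no responses → Spec_count_yes_no responses (count_yes_no responses)

-- ===== LEMMAS AND PROOFS =====

-- 'yes' prefix forces first character 'y', 'no' prefix forces 'n': mutually exclusive.
theorem yes_not_no (s : String) (h : PySem.Str.startswith s "yes" = true) :
    PySem.Str.startswith s "no" = false := by
  rw [PySem.Str.startswith_eq] at h ⊢
  rw [PySem.Chars.startswith_iff] at h
  by_contra hn
  rw [Bool.not_eq_false, PySem.Chars.startswith_iff] at hn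
  obtain ⟨t1, h1⟩ := h
  obtain ⟨t2, h2⟩ := hn
  rw [← h2] at h1
  have e1 : "yes".toList = ['y','e','s'] := rfl
  have e2 : "no".toList = ['n','o'] := rfl
  rw [e1, e2] at h1
  simp at h1

-- a 'yes'/'no' prefix of the normalised string forces the raw string nonempty
theorem yes_ne_empty (r : String) (p : String)
    (h : PySem.Str.startswith (PySem.Str.lower (PySem.Str.strip r)) p = true) (hp : p ≠ "") :
    (r == "") = false := by
  by_contra he
  rw [Bool.not_eq_false, beq_iff_eq] at he
  subst he
  rw [PySem.Str.startswith_eq, PySem.Chars.startswith_iff] at h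
  obtain ⟨t, ht⟩ := h
  have : (PySem.Str.lower (PySem.Str.strip "")).toList = [] := by decide
  rw [this] at ht
  have hp2 := (List.append_eq_nil_iff.mp ht).1
  exact hp (String.toList_eq_nil_iff.mp hp2)

-- loop characterisation: A's fold adds B's three counts to the accumulator
theorem loop_char (l : List String) : ∀ (a b c : Int),
    l.foldl (fun acc response =>
      if response == "" then acc
      else
        let value := PySem.Str.lower (PySem.Str.strip response)
        if PySem.Str.startswith value "yes" then (acc.1 + 1, acc.2.1, acc.2.2)
        else if PySem.Str.startswith value "no" then (acc.1, acc.2.1 + 1, acc.2.2)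
        else (acc.1, acc.2.1, acc.2.2 + 1)) (a, b, c)
    = (a + (l.countP (fun r => PySem.Str.startswith (PySem.Str.lower (PySem.Str.strip r)) "yes") : Int),
       b + (l.countP (fun r => PySem.Str.startswith (PySem.Str.lower (PySem.Str.strip r)) "no") : Int),
       c + ((l.countP (fun r => !(r == "")) : Int)
            - (l.countP (fun r => PySem.Str.startswith (PySem.Str.lower (PySem.Str.strip r)) "yes") : Int)
            - (l.countP (fun r => PySem.Str.startswith (PySem.Str.lower (PySem.Str.strip r)) "no") : Int))) := by
  induction l with
  | nil => intro a b c; simp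
  | cons r t ih =>
    intro a b c
    simp only [List.foldl_cons, List.countP_cons]
    by_cases he : (r == "") = true
    · have hy : PySem.Str.startswith (PySem.Str.lower (PySem.Str.strip r)) "yes" = false := by
        by_contra h; rw [Bool.not_eq_false] at h
        rw [yes_ne_empty r "yes" h (by decide)] at he; exact Bool.false_ne_true he
      have hn : PySem.Str.startswith (PySem.Str.lower (PySem.Str.strip r)) "no" = false := by
        by_contra h; rw [Bool.not_eq_false] at h
        rw [yes_ne_empty r "no" h (by decide)] at he; exact Bool.false_ne_true he
      simp only [he, if_true, hy, hn, Bool.not_true, Bool.false_eq_true, if_false]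
      rw [ih]
      simp
    · rw [Bool.not_eq_true] at he
      by_cases hy : PySem.Str.startswith (PySem.Str.lower (PySem.Str.strip r)) "yes" = true
      · have hn := yes_not_no _ hy
        simp only [he, hy, hn, Bool.not_false, Bool.false_eq_true, if_false, if_true]
        rw [ih]
        simp only [Prod.mk.injEq]
        refine ⟨by push_cast; ring, by push_cast; ring, by push_cast; ring⟩
      · rw [Bool.not_eq_true] at hy
        by_cases hn : PySem.Str.startswith (PySem.Str.lower (PySem.Str.strip r)) "no" = true
        · simp only [he, hy, hn, Bool.not_false, Bool.false_eq_true, if_false, if_true]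
          rw [ih]
          simp only [Prod.mk.injEq]
          refine ⟨by push_cast; ring, by push_cast; ring, by push_cast; ring⟩
        · rw [Bool.not_eq_true] at hn
          simp only [he, hy, hn, Bool.not_false, Bool.false_eq_true, if_false, if_true]
          rw [ih]
          simp only [Prod.mk.injEq]
          refine ⟨by push_cast; ring, by push_cast; ring, by push_cast; ring⟩

-- ===== VERDICT (by name: the statement is the Claim_ definition above) =====
theorem count_yes_no_spec : Claim_equal_count_yes_no := by
  intro responses _
  unfold Spec_count_yes_no count_yes_no count_yes_no_alt
  simp only [pvNorm, loop_char, zero_add]
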